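-- pv_equiv track=rewrite | github.com/GRAM-Corporation/ulys-demodocus | src/gram_deploy/services/time_alignment.py | _cluster_offsets
-- ===== SOURCE A (Python) =====
-- def _cluster_offsets(
--
--     offsets: list[int],
--     tolerance_ms: int = 2000,
-- ) -> list[list[int]]:
--     """Cluster offsets by proximity.
--
--     Args:
--         offsets: List of offset values in milliseconds
--         tolerance_ms: Maximum difference to be in same cluster
--
--     Returns:
--         List of clusters, each cluster is a list of offsets
--     """
--     if not offsets:
--         return []
--
--     sorted_offsets = sorted(offsets)
--     clusters: list[list[int]] = [[sorted_offsets[0]]]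
--
--     for offset in sorted_offsets[1:]:
--         # Check if offset belongs to current cluster
--         if abs(offset - clusters[-1][-1]) <= tolerance_ms:
--             clusters[-1].append(offset)
--         else:
--             # Start new cluster
--             clusters.append([offset])
--
--     return clusters
-- ===== SOURCE B (Python) =====
-- def _cluster_offsets(
--     offsets: list[int],
--     tolerance_ms: int = 2000,
-- ) -> list[list[int]]:
--     """Cluster offsets by proximity: find cut points first, then slice."""
--     if not offsets:
--         return []
--
--     s = sorted(offsets)
--     n = len(s)
--
--     # Boundary indices: positions where the gap to the predecessor exceeds tolerance.
--     cuts = [0]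
--     for i in range(1, n):
--         if s[i] - s[i - 1] > tolerance_ms:
--             cuts.append(i)
--     cuts.append(n)
--
--     # Partition the sorted list into consecutive slices between cut points.
--     return [s[a:b] for a, b in zip(cuts, cuts[1:])]
-- ===== Notes on version B (the rewrite author's own statement) =====
-- stated objective: alternative
-- what changed: Instead of growing the last cluster element by element with abs-comparisons against the last element of the current cluster, B first computes the list of boundary indices (where the gap between adjacent sorted values exceeds the tolerance) and then partitions the sorted list into slices between consecutive cut points.
import Mathlib
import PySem

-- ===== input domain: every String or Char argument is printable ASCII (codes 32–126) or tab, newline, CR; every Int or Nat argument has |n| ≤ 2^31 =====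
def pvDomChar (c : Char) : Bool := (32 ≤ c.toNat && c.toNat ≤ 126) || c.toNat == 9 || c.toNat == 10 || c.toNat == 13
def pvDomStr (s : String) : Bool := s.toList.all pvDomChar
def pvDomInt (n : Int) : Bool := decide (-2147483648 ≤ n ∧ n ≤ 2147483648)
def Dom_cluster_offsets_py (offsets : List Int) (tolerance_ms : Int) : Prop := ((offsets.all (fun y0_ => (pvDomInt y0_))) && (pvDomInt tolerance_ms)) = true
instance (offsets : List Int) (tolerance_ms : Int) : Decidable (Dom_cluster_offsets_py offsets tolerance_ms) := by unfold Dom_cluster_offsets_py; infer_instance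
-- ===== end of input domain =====

-- B computes gap cut-indices first and slices the sorted list between them, instead of growing
-- the last cluster element by element (objective: alternative decomposition, same cost).


-- ===== PORT A =====
-- the loop body of A: append to clusters[-1] (via set at -1) or start a new cluster
def pvStepA (tolerance_ms : Int) (clusters : List (List Int)) (offset : Int) : List (List Int) :=
  if |offset - PySem.List.pyGetD (PySem.List.pyGetD clusters (-1) []) (-1) 0| ≤ tolerance_ms then
    PySem.List.pySetD clusters (-1) (PySem.List.pyGetD clusters (-1) [] ++ [offset])
  else
    clusters ++ [[offset]]

def cluster_offsets_py (offsets : List Int) (tolerance_ms : Int) : List (List Int) :=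
  if offsets = [] then []
  else
    let sorted_offsets := PySem.List.sorted offsets (fun x => x)
    -- sorted_offsets[0]: index always in range (offsets nonempty)
    let clusters : List (List Int) := [[PySem.List.pyGetD sorted_offsets 0 0]]
    (PySem.List.slice sorted_offsets (some 1) none).foldl (pvStepA tolerance_ms) clusters

-- ===== PORT B =====
def cluster_offsets_py_alt (offsets : List Int) (tolerance_ms : Int) : List (List Int) :=
  if offsets = [] then []
  else
    let s := PySem.List.sorted offsets (fun x => x)
    let n : Int := PySem.List.len s
    -- s[i], s[i-1]: indices always in range (1 ≤ i < n)
    let cuts : List Int := (PySem.List.pyRange 1 n).foldl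
      (fun cuts i =>
        if PySem.List.pyGetD s i 0 - PySem.List.pyGetD s (i - 1) 0 > tolerance_ms then cuts ++ [i]
        else cuts)
      [0]
    let cuts := cuts ++ [n]
    (cuts.zip cuts.tail).map (fun ab => PySem.List.slice s (some ab.1) (some ab.2))

-- ===== PRECONDITION & SPEC =====
def Spec_cluster_offsets_py (offsets : List Int) (tolerance_ms : Int) (out : List (List Int)) : Prop := out = cluster_offsets_py_alt offsets tolerance_ms
instance (offsets : List Int) (tolerance_ms : Int) (out : List (List Int)) : Decidable (Spec_cluster_offsets_py offsets tolerance_ms out) := by unfold Spec_cluster_offsets_py; infer_instance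

-- ===== CLAIM (what is proved, stated in full; the proofs are below) =====
def Claim_equal_cluster_offsets_py : Prop := ∀ (offsets : List Int) (tolerance_ms : Int), Dom_cluster_offsets_py offsets tolerance_ms → Spec_cluster_offsets_py offsets tolerance_ms (cluster_offsets_py offsets tolerance_ms)

-- ===== LEMMAS AND PROOFS =====

-- Canonical clustering of a list by the "gap > tol" rule, prepending into the first cluster.
def pvChop (tol : Int) : List Int → List (List Int)
  | [] => []
  | [x] => [[x]]
  | x :: y :: t =>
    if y - x > tol then [x] :: pvChop tol (y :: t)
    else
      match pvChop tol (y :: t) with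
      | c :: cs => (x :: c) :: cs
      | [] => [[x]]

-- shape: pvChop of a nonempty list starts with a cluster headed by the list's head
theorem pvChop_cons_shape (tol : Int) (xs : List Int) (x : Int) :
    ∃ c cs, pvChop tol (x :: xs) = (x :: c) :: cs := by
  induction xs generalizing x with
  | nil => exact ⟨[], [], rfl⟩
  | cons y t ih =>
    by_cases h : y - x > tol
    · exact ⟨[], pvChop tol (y :: t), by simp [pvChop, h]⟩
    · obtain ⟨c, cs, hc⟩ := ih y
      exact ⟨y :: c, cs, by simp [pvChop, h, hc]⟩

-- A-side canonical accumulator recursion (cur = current cluster, p = its last element)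
def pvChopFrom (tol : Int) (cur : List Int) (p : Int) : List Int → List (List Int)
  | [] => [cur]
  | x :: xs => if x - p > tol then cur :: pvChopFrom tol [x] x xs else pvChopFrom tol (cur ++ [x]) x xs

theorem pvStepA_append (tol : Int) (acc : List (List Int)) (c : List Int) (x : Int) :
    pvStepA tol (acc ++ [c]) x =
      if |x - PySem.List.pyGetD c (-1) 0| ≤ tol then acc ++ [c ++ [x]] else (acc ++ [c]) ++ [[x]] := by
  simp only [pvStepA, PySem.List.pyGetD_neg_one_append_singleton]
  split_ifs with h
  · simp [PySem.List.pySetD, PySem.List.pySet?, PySem.List.pyIdx?]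
  · rfl

-- the fold never touches clusters other than the last: a prefix factors out
theorem pv_foldl_stepA_append (tol : Int) (xs : List Int) (acc : List (List Int)) (c : List Int) :
    xs.foldl (pvStepA tol) (acc ++ [c]) = acc ++ xs.foldl (pvStepA tol) [c] := by
  induction xs generalizing acc c with
  | nil => rfl
  | cons x xs ih =>
    simp only [List.foldl_cons]
    rw [pvStepA_append tol acc c x]
    have h1 : pvStepA tol [c] x =
        if |x - PySem.List.pyGetD c (-1) 0| ≤ tol then [c ++ [x]] else [c] ++ [[x]] := by
      simpa using pvStepA_append tol [] c x
    rw [h1]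
    split_ifs with h
    · exact ih acc (c ++ [x])
    · rw [ih (acc ++ [c]) [x], ih [c] [x], List.append_assoc]

theorem pv_foldl_stepA_eq_chopFrom (tol : Int) (xs : List Int) (cur : List Int) (p : Int)
    (hlast : PySem.List.pyGetD cur (-1) 0 = p)
    (hsorted : (p :: xs).Pairwise (· ≤ ·)) :
    xs.foldl (pvStepA tol) [cur] = pvChopFrom tol cur p xs := by
  induction xs generalizing cur p with
  | nil => rfl
  | cons x xs ih =>
    have hpx : p ≤ x := (List.pairwise_cons.mp hsorted).1 x (by simp)
    have habs : |x - p| = x - p := abs_of_nonneg (by omega)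
    simp only [List.foldl_cons, pvChopFrom]
    have h1 : pvStepA tol [cur] x =
        if |x - PySem.List.pyGetD cur (-1) 0| ≤ tol then [cur ++ [x]] else [cur] ++ [[x]] := by
      simpa using pvStepA_append tol [] cur x
    rw [h1, hlast, habs]
    have htail : (x :: xs).Pairwise (· ≤ ·) := hsorted.of_cons
    by_cases h : x - p > tol
    · simp only [if_neg (by omega : ¬ x - p ≤ tol), if_pos h]
      rw [pv_foldl_stepA_append tol xs [cur] [x]]
      rw [ih [x] x (PySem.List.pyGetD_neg_one_append_singleton ([] : List Int) x 0) htail]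
      rfl
    · simp only [if_pos (by omega : x - p ≤ tol), if_neg h]
      exact ih (cur ++ [x]) x (PySem.List.pyGetD_neg_one_append_singleton _ _ _) htail

theorem pvChopFrom_eq_chop (tol : Int) (xs : List Int) (cur : List Int) (p : Int)
    (c : List Int) (cs : List (List Int)) (hc : pvChop tol (p :: xs) = (p :: c) :: cs) :
    pvChopFrom tol cur p xs = (cur ++ c) :: cs := by
  induction xs generalizing cur p c cs with
  | nil =>
    simp only [pvChop] at hc
    obtain ⟨h1, h2⟩ := by exact And.intro (List.cons.inj (List.cons.inj hc).1).2 (List.cons.inj hc).2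
    simp [pvChopFrom, ← h1, ← h2]
  | cons x xs ih =>
    obtain ⟨c', cs', hshape⟩ := pvChop_cons_shape tol xs x
    by_cases h : x - p > tol
    · simp only [pvChop, if_pos h] at hc
      obtain hcnil : c = [] := by
        have := (List.cons.inj hc).1; exact (List.cons.inj this).2.symm
      have hcs : cs = pvChop tol (x :: xs) := (List.cons.inj hc).2.symm
      simp only [pvChopFrom, if_pos h, hcnil, hcs, List.append_nil]
      rw [ih [x] x c' cs' hshape]
      simp [hshape]
    · simp only [pvChop, if_neg h, hshape] at hc
      have h1 : c = x :: c' := (List.cons.inj (List.cons.inj hc).1).2.symm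
      have h2 : cs = cs' := (List.cons.inj hc).2.symm
      simp only [pvChopFrom, if_neg h]
      rw [ih (cur ++ [x]) x c' cs' hshape, h1, h2, List.append_assoc]
      rfl

-- A equals pvChop on the sorted list
theorem pvA_eq_chop (offsets : List Int) (tol : Int) (h : offsets ≠ []) :
    cluster_offsets_py offsets tol = pvChop tol (PySem.List.sorted offsets (fun x => x)) := by
  unfold cluster_offsets_py
  rw [if_neg h]
  have hs : PySem.List.sorted offsets (fun x => x) ≠ [] := by
    simpa [PySem.List.sorted_eq_nil_iff] using h
  obtain ⟨a, t, hat⟩ := List.exists_cons_of_ne_nil hs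
  have hpw : (a :: t).Pairwise (· ≤ ·) := by
    have := PySem.List.sorted_pairwise offsets (fun x => x)
    rwa [hat] at this
  rw [hat]
  show (PySem.List.slice (a :: t) (some 1) none).foldl (pvStepA tol)
      [[PySem.List.pyGetD (a :: t) 0 0]] = pvChop tol (a :: t)
  rw [PySem.List.slice_from_one]
  simp only [PySem.List.pyGetD_zero_cons, List.tail_cons]
  obtain ⟨c, cs, hshape⟩ := pvChop_cons_shape tol t a
  rw [pv_foldl_stepA_eq_chopFrom tol t [a] a
      (PySem.List.pyGetD_neg_one_append_singleton ([] : List Int) a 0) hpw,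
    pvChopFrom_eq_chop tol t [a] a c cs hshape, hshape]
  rfl

-- ---- B side ----

-- nat-level cut indices: 1-based positions of gaps exceeding tol
def pvCutsN (tol : Int) (s : List Int) : List Nat :=
  ((List.range (s.length - 1)).filter (fun k => decide (s.getD (k + 1) 0 - s.getD k 0 > tol))).map (· + 1)

-- nat-level slicing between consecutive cut points
def pvSlicesBy (s : List Int) : List Nat → List (List Int)
  | a :: b :: rest => (s.drop a).take (b - a) :: pvSlicesBy s (b :: rest)
  | _ => []

theorem pvSlicesBy_map_succ (s' : List Int) (a : Int) (cs : List Nat) :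
    pvSlicesBy (a :: s') (cs.map (· + 1)) = pvSlicesBy s' cs := by
  induction cs with
  | nil => rfl
  | cons b rest ih =>
    cases rest with
    | nil => rfl
    | cons c rest2 =>
      simp only [List.map_cons, pvSlicesBy] at *
      rw [ih]
      congr 1
      simp [List.drop_succ_cons, Nat.succ_sub_succ]

theorem pvCutsN_cons (tol : Int) (a b : Int) (t : List Int) :
    pvCutsN tol (a :: b :: t) =
      (if b - a > tol then [1] else []) ++ (pvCutsN tol (b :: t)).map (· + 1) := by
  unfold pvCutsN
  simp only [List.length_cons, Nat.add_sub_cancel]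
  rw [List.range_succ_eq_map, List.filter_cons, List.filter_map]
  have hf : ((fun x : Nat => x + 1) ∘ Nat.succ) = (fun x : Nat => x + 2) := by
    funext x; simp [Function.comp]
  have hg : List.filter ((fun k => decide (tol < (b :: t)[k]?.getD 0 - (a :: b :: t)[k]?.getD 0)) ∘ Nat.succ)
        (List.range t.length)
      = List.filter (fun k => decide (tol < t[k]?.getD 0 - (b :: t)[k]?.getD 0)) (List.range t.length) := by
    apply List.filter_congr; intro k _; simp [Function.comp]
  by_cases hgap : b - a > tol
  · simp [hgap, List.map_map]
    rw [hf]
    exact congrArg _ hg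
  · simp [hgap, List.map_map]
    rw [hf]
    exact congrArg _ hg

theorem pvSlicesBy_eq_chop (tol : Int) (s : List Int) (h : s ≠ []) :
    pvSlicesBy s (0 :: (pvCutsN tol s ++ [s.length])) = pvChop tol s := by
  induction s with
  | nil => exact absurd rfl h
  | cons a s' ih =>
    cases s' with
    | nil => simp [pvCutsN, pvSlicesBy, pvChop]
    | cons b t =>
      rw [pvCutsN_cons]
      by_cases hgap : b - a > tol
      · simp only [if_pos hgap]
        have hlist : ((1 :: (pvCutsN tol (b :: t)).map (· + 1)) ++ [(a :: b :: t).length])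
            = ((0 :: (pvCutsN tol (b :: t) ++ [(b :: t).length])).map (· + 1)) := by
          simp
        have hchop : pvChop tol (a :: b :: t) = [a] :: pvChop tol (b :: t) := by
          simp [pvChop, hgap]
        rw [hchop, ← ih (by simp)]
        show ((a :: b :: t).drop 0).take (1 - 0) :: pvSlicesBy (a :: b :: t) ((1 :: (pvCutsN tol (b :: t)).map (· + 1)) ++ [(a :: b :: t).length]) = _
        rw [hlist, pvSlicesBy_map_succ]
        rfl
      · simp only [if_neg hgap, List.nil_append]
        obtain ⟨e, rest, her⟩ : ∃ e rest, pvCutsN tol (b :: t) ++ [(b :: t).length] = e :: rest := by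
          cases hc : pvCutsN tol (b :: t) with
          | nil => exact ⟨(b :: t).length, [], by simp⟩
          | cons u us => exact ⟨u, us ++ [(b :: t).length], by simp⟩
        have hform : (((pvCutsN tol (b :: t)).map (· + 1)) ++ [(a :: b :: t).length])
            = (e + 1) :: rest.map (· + 1) := by
          have : ((pvCutsN tol (b :: t)).map (· + 1)) ++ [(a :: b :: t).length]
              = ((pvCutsN tol (b :: t)) ++ [(b :: t).length]).map (· + 1) := by simp
          rw [this, her]; rfl
        have hchop : pvChop tol (a :: b :: t) =
            match pvChop tol (b :: t) with
            | c :: cs => (a :: c) :: cs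
            | [] => [[a]] := by
          simp [pvChop, hgap]
        have hihx := ih (by simp)
        rw [her] at hihx
        have hsl : pvSlicesBy (b :: t) (0 :: e :: rest)
            = ((b :: t).take e) :: pvSlicesBy (b :: t) (e :: rest) := by
          simp [pvSlicesBy]
        rw [hsl] at hihx
        rw [hchop, ← hihx]
        rw [hform]
        show ((a :: b :: t).drop 0).take ((e + 1) - 0) :: pvSlicesBy (a :: b :: t) ((e + 1) :: rest.map (· + 1)) = _
        have hmap : pvSlicesBy (a :: b :: t) ((e + 1) :: rest.map (· + 1)) = pvSlicesBy (b :: t) (e :: rest) := by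
          simpa using pvSlicesBy_map_succ (b :: t) a (e :: rest)
        rw [hmap]
        simp [List.take_succ_cons]

-- the Int-level slice map over casted cuts equals the Nat-level slicing
theorem pvMapSlice_eq_slicesBy (s : List Int) (cs : List Nat) :
    (((cs.map (fun k => Int.ofNat k)).zip ((cs.map (fun k => Int.ofNat k)).tail)).map
        (fun ab => PySem.List.slice s (some ab.1) (some ab.2)))
      = pvSlicesBy s cs := by
  induction cs with
  | nil => rfl
  | cons a rest ih =>
    cases rest with
    | nil => rfl
    | cons b rest2 =>
      simp only [List.map_cons, List.tail_cons, List.zip_cons_cons, List.map_cons] at *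
      rw [ih]
      simp [pvSlicesBy, Int.ofNat_eq_natCast, PySem.List.slice_natCast]

-- B's Int cut list is the casted Nat cut list
theorem pvB_cuts (tol : Int) (s : List Int) :
    (PySem.List.pyRange 1 (PySem.List.len s)).foldl
      (fun cuts i =>
        if PySem.List.pyGetD s i 0 - PySem.List.pyGetD s (i - 1) 0 > tol then cuts ++ [i]
        else cuts) [0] ++ [PySem.List.len s]
      = ((0 :: (pvCutsN tol s ++ [s.length])).map (fun k => Int.ofNat k)) := by
  have hfold := PySem.List.foldl_append_if
    (fun i => decide (PySem.List.pyGetD s i 0 - PySem.List.pyGetD s (i - 1) 0 > tol))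
    (fun i => i) (PySem.List.pyRange 1 (PySem.List.len s)) [(0 : Int)]
  simp only [decide_eq_true_eq] at hfold
  rw [hfold, List.map_id']
  rw [PySem.List.pyRange_one, PySem.List.len_eq]
  have hcast : ((s.length : Int) - 1).toNat = s.length - 1 := by omega
  rw [hcast, List.filter_map]
  have hpred : ∀ k ∈ List.range (s.length - 1),
      ((fun i => decide (PySem.List.pyGetD s i 0 - PySem.List.pyGetD s (i - 1) 0 > tol)) ∘
          (fun k : Nat => (1 : Int) + (k : Int))) k
        = (fun k => decide (s.getD (k + 1) 0 - s.getD k 0 > tol)) k := by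
    intro k _
    have h1 : (1 : Int) + (k : Int) = ((k + 1 : Nat) : Int) := by push_cast; ring
    have h2 : ((k + 1 : Nat) : Int) - 1 = ((k : Nat) : Int) := by push_cast; ring
    simp only [Function.comp, h1, h2, PySem.List.pyGetD_natCast]
  rw [List.filter_congr hpred]
  unfold pvCutsN
  simp only [List.map_cons, List.map_append, List.map_map, List.cons_append, List.nil_append,
    List.map_nil, Int.ofNat_eq_natCast, Nat.cast_zero]
  congr 1
  congr 1
  apply List.map_congr_left
  intro k _
  simp only [Function.comp]
  push_cast
  ring

theorem pvB_eq_chop (offsets : List Int) (tol : Int) (h : offsets ≠ []) :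
    cluster_offsets_py_alt offsets tol = pvChop tol (PySem.List.sorted offsets (fun x => x)) := by
  unfold cluster_offsets_py_alt
  rw [if_neg h]
  have hs : (PySem.List.sorted offsets (fun x => x)) ≠ [] := by
    simpa [PySem.List.sorted_eq_nil_iff] using h
  show ((((PySem.List.pyRange 1 (PySem.List.len (PySem.List.sorted offsets (fun x => x)))).foldl
      (fun cuts i =>
        if PySem.List.pyGetD (PySem.List.sorted offsets (fun x => x)) i 0 - PySem.List.pyGetD (PySem.List.sorted offsets (fun x => x)) (i - 1) 0 > tol then cuts ++ [i]
        else cuts) [0] ++ [PySem.List.len (PySem.List.sorted offsets (fun x => x))]).zip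
      ((PySem.List.pyRange 1 (PySem.List.len (PySem.List.sorted offsets (fun x => x)))).foldl
      (fun cuts i =>
        if PySem.List.pyGetD (PySem.List.sorted offsets (fun x => x)) i 0 - PySem.List.pyGetD (PySem.List.sorted offsets (fun x => x)) (i - 1) 0 > tol then cuts ++ [i]
        else cuts) [0] ++ [PySem.List.len (PySem.List.sorted offsets (fun x => x))]).tail).map
    (fun ab => PySem.List.slice (PySem.List.sorted offsets (fun x => x)) (some ab.1) (some ab.2)))
    = pvChop tol (PySem.List.sorted offsets (fun x => x))
  rw [pvB_cuts tol (PySem.List.sorted offsets (fun x => x))]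
  rw [pvMapSlice_eq_slicesBy]
  exact pvSlicesBy_eq_chop tol _ hs

-- ===== VERDICT (by name: the statement is the Claim_ definition above) =====
theorem cluster_offsets_py_spec : Claim_equal_cluster_offsets_py := by
  intro offsets tol _
  unfold Spec_cluster_offsets_py
  by_cases h : offsets = []
  · subst h; rfl
  · rw [pvA_eq_chop offsets tol h, pvB_eq_chop offsets tol h]
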